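-- pv_equiv track=rewrite | github.com/trinity-project/trinity | thin_wallet/Utils.py | get_from_addr
-- ===== SOURCE A (Python) =====
-- def get_from_addr(params):
--     to_remove = []
--     from_addr = None
--     for item in params:
--         if '--from-addr=' in item:
--             to_remove.append(item)
--             try:
--                 from_addr = item.replace('--from-addr=', '')
--             except Exception as e:
--                 pass
--     for item in to_remove:
--         params.remove(item)
--
--     return params, from_addr
-- ===== SOURCE B (Python) =====
-- def get_from_addr(params):
--     matches = [item for item in params if '--from-addr=' in item]
--     params[:] = [item for item in params if '--from-addr=' not in item]
--     from_addr = matches[-1].replace('--from-addr=', '') if matches else None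
--     return params, from_addr
-- ===== Notes on version B (the rewrite author's own statement) =====
-- stated objective: alternative
-- what changed: two declarative filters plus taking the last match, instead of A's accumulate-matches loop followed by a quadratic list.remove loop
import Mathlib
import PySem

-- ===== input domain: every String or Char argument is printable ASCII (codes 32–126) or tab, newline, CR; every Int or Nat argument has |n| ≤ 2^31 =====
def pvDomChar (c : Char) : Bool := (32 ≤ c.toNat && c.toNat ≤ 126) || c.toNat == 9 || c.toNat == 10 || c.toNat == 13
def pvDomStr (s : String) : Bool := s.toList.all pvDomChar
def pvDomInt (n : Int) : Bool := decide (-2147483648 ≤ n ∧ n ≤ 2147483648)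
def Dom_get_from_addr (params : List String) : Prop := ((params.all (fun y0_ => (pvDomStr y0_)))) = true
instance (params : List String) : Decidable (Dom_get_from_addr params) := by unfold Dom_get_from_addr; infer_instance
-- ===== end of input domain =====

-- B replaces A's accumulate-then-list.remove loops by two declarative filters plus
-- the last matching element; A mutates `params` in place via remove() (B's Python
-- mimics the mutation; the equivalence proved here is about the return value).


-- ===== PORT A =====
-- first loop: collect matching items and (last) replaced value; second loop: params.remove(item)
-- (list.remove removes the first occurrence; remove? = none is Python's ValueError, unreachable
--  here since every collected item is in params)
def get_from_addr (params : List String) : List String × Option String :=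
  let st := params.foldl
    (fun (st : List String × Option String) item =>
      if PySem.Str.isIn "--from-addr=" item then
        (st.1 ++ [item], some (PySem.Str.replace item "--from-addr=" ""))
      else st) ([], none)
  let params' := st.1.foldl
    (fun ps item =>
      match PySem.List.remove? ps item with
      | some l => l
      | none => ps) params
  (params', st.2)

-- ===== PORT B =====
-- matches = filter; params[:] = filter of the complement; from_addr from matches[-1] if any
def get_from_addr_alt (params : List String) : List String × Option String :=
  let ms := params.filter (fun item => PySem.Str.isIn "--from-addr=" item)
  let kept := params.filter (fun item => !PySem.Str.isIn "--from-addr=" item)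
  let from_addr :=
    if ms ≠ [] then
      (PySem.List.pyGet? ms (-1)).map (fun m => PySem.Str.replace m "--from-addr=" "")
    else none
  (kept, from_addr)

-- ===== PRECONDITION & SPEC =====
def Spec_get_from_addr (params : List String) (out : List String × Option String) : Prop := out = get_from_addr_alt params
instance (params : List String) (out : List String × Option String) : Decidable (Spec_get_from_addr params out) := by unfold Spec_get_from_addr; infer_instance

-- ===== CLAIM =====
def Claim_equal_get_from_addr : Prop := ∀ (params : List String), Dom_get_from_addr params → Spec_get_from_addr params (get_from_addr params)

-- ===== LEMMAS AND PROOFS =====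

-- A's first loop: accumulator = filter, from_addr = last match (as an option fold)
theorem afold_eq (p : String → Bool) (r : String → String) (params : List String)
    (acc : List String) (fa : Option String) :
    params.foldl (fun (st : List String × Option String) item =>
        if p item then (st.1 ++ [item], some (r item)) else st) (acc, fa)
    = (acc ++ params.filter p,
       params.foldl (fun fa it => if p it then some (r it) else fa) fa) := by
  induction params generalizing acc fa with
  | nil => simp
  | cons x xs ih =>
    by_cases hx : p x = true <;> simp [List.foldl_cons, hx, ih]

-- the last-match fold is the last element of the filter (mapped through r)
theorem lastfold_eq (p : String → Bool) (r : String → String) (params : List String)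
    (fa : Option String) :
    params.foldl (fun fa it => if p it then some (r it) else fa) fa
    = (match (params.filter p).getLast? with
       | some y => some (r y)
       | none => fa) := by
  induction params generalizing fa with
  | nil => rfl
  | cons x xs ih =>
    by_cases hx : p x = true
    · rw [List.foldl_cons, if_pos hx, ih, List.filter_cons_of_pos hx]
      cases h : (xs.filter p).getLast? with
      | none => simp [List.getLast?_cons, h]
      | some y => simp [List.getLast?_cons, h]
    · rw [List.foldl_cons, if_neg hx, ih, List.filter_cons_of_neg (by simpa using hx)]

-- removing items that all satisfy p leaves a ¬p head untouched
theorem removeFold_cons (p : String → Bool) (items : List String) (l : List String)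
    (x : String) (hall : ∀ it ∈ items, p it = true) (hx : p x = false) :
    items.foldl (fun ps item =>
        match PySem.List.remove? ps item with
        | some l' => l'
        | none => ps) (x :: l)
    = x :: items.foldl (fun ps item =>
        match PySem.List.remove? ps item with
        | some l' => l'
        | none => ps) l := by
  induction items generalizing l with
  | nil => simp
  | cons it its ih =>
    have hne : x ≠ it := by
      intro h; rw [h] at hx; simp [hall it (by simp)] at hx
    have : PySem.List.remove? (x :: l) it = (PySem.List.remove? l it).map (x :: ·) :=
      PySem.List.remove?_cons_of_ne l hne
    simp only [List.foldl_cons, this]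
    cases h : PySem.List.remove? l it with
    | none => simp [ih _ (fun a ha => hall a (by simp [ha]))]
    | some l' => simp [ih _ (fun a ha => hall a (by simp [ha]))]

-- A's second loop removes exactly the matching occurrences
theorem removeFold_filter (p : String → Bool) (params : List String) :
    (params.filter p).foldl (fun ps item =>
        match PySem.List.remove? ps item with
        | some l' => l'
        | none => ps) params
    = params.filter (fun i => !p i) := by
  induction params with
  | nil => simp
  | cons x xs ih =>
    by_cases hx : p x = true
    · simp only [List.filter_cons_of_pos hx, List.foldl_cons,
        PySem.List.remove?_cons_self, List.filter_cons, hx]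
      simpa [hx] using ih
    · have hx' : p x = false := by simpa using hx
      rw [List.filter_cons_of_neg (by simp [hx']),
        removeFold_cons p _ xs x (fun it hit => (List.mem_filter.mp hit).2) hx', ih]
      simp [hx']

-- ===== VERDICT =====
theorem get_from_addr_spec : Claim_equal_get_from_addr := by
  intro params _
  unfold Spec_get_from_addr get_from_addr get_from_addr_alt
  rw [afold_eq (fun item => PySem.Str.isIn "--from-addr=" item)
        (fun item => PySem.Str.replace item "--from-addr=" ""),
      lastfold_eq (fun item => PySem.Str.isIn "--from-addr=" item)
        (fun item => PySem.Str.replace item "--from-addr=" "")]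
  simp only [List.nil_append]
  rw [removeFold_filter (fun item => PySem.Str.isIn "--from-addr=" item) params]
  have hm : ∀ (l : List String),
      (if l ≠ [] then (PySem.List.pyGet? l (-1)).map
          (fun m => PySem.Str.replace m "--from-addr=" "") else none)
      = (match l.getLast? with
         | some y => some (PySem.Str.replace y "--from-addr=" "")
         | none => (none : Option String)) := by
    intro l
    cases l with
    | nil => rfl
    | cons x xs =>
      rw [if_pos (by simp), PySem.List.pyGet?_neg_one]
      cases h : (x :: xs).getLast? with
      | none => simp at h
      | some y => simp
  rw [hm]
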